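-- pv_equiv track=rewrite | github.com/GuilhermeGSousa/SATPLAN | Encoder.py | generatePossibleSets
-- ===== SOURCE A (Python) =====
-- def generatePossibleSets(nterms, terms):
--     # Generates all possible combinations of nterms with the
--     # values supplied in terms recursively;
--     # Returns the set as a list of lists
--     set = []
--     if nterms == 1:
--         for term in terms:
--             set.append([term])
--         return set
--     else:
--         subset = generatePossibleSets(nterms - 1, terms)
--         for term in terms:
--             for i in range(len(subset)):
--                 set.append([term] + subset[i])
--         return set
-- ===== SOURCE B (Python) =====
-- def generatePossibleSets(nterms, terms):
--     # Bottom-up: start from the length-1 combinations and prepend one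
--     # leading term per iteration (leading element varies slowest).
--     result = [[t] for t in terms]
--     for _ in range(nterms - 1):
--         result = [[t] + s for t in terms for s in result]
--     return result
-- ===== Notes on version B (the rewrite author's own statement) =====
-- stated objective: simpler
-- what changed: Replaces the recursion with an explicit bottom-up loop that starts from the singleton combinations and prepends one leading term per iteration.
import Mathlib
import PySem

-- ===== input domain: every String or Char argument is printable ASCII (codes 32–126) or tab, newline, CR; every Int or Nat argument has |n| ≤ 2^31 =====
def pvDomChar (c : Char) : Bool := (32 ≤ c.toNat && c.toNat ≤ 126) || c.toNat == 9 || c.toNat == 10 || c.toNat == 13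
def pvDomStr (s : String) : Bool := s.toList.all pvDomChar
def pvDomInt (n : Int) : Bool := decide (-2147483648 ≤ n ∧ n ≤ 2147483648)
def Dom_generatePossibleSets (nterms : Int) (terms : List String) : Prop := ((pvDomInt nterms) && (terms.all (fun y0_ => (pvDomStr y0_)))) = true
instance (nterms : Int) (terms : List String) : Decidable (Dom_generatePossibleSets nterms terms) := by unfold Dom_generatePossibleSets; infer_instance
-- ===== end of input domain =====

-- B replaces A's recursion by an explicit bottom-up loop (same cost, simpler); on nterms ≤ 0,
-- where A recurses forever (RecursionError), B returns the singleton combinations.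

-- ===== PORT A =====
-- Literal port of A's recursion; the 'nterms ≤ 0' guard only makes the recursion total
-- (Python diverges there; such inputs are outside Pre_).
def generatePossibleSets (nterms : Int) (terms : List String) : List (List String) :=
  if nterms ≤ 0 then []
  else if nterms = 1 then
    terms.foldl (fun s t => s ++ [[t]]) []
  else
    let subset := generatePossibleSets (nterms - 1) terms
    terms.foldl (fun s t =>
      (PySem.List.pyRange 0 (subset.length : Int) 1).foldl
        (fun s i => s ++ [[t] ++ PySem.List.pyGetD subset i []]) s) []
termination_by nterms.toNat
decreasing_by omega

-- ===== PORT B =====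
def generatePossibleSets_alt (nterms : Int) (terms : List String) : List (List String) :=
  let init := terms.map (fun t => [t])
  (PySem.List.pyRange 0 (nterms - 1) 1).foldl
    (fun result _ => terms.flatMap (fun t => result.map (fun s => [t] ++ s))) init

-- ===== PRECONDITION & SPEC =====
-- Pre_ excludes nterms ≤ 0, on which Python A never returns (RecursionError).
def Pre_generatePossibleSets (nterms : Int) (terms : List String) : Prop := 1 ≤ nterms
instance (nterms : Int) (terms : List String) : Decidable (Pre_generatePossibleSets nterms terms) := by unfold Pre_generatePossibleSets; infer_instance
def pvWitness_generatePossibleSets : Int × List String := (2, ["a", "b"])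

def Spec_generatePossibleSets (nterms : Int) (terms : List String) (out : List (List String)) : Prop := out = generatePossibleSets_alt nterms terms
instance (nterms : Int) (terms : List String) (out : List (List String)) : Decidable (Spec_generatePossibleSets nterms terms out) := by unfold Spec_generatePossibleSets; infer_instance

-- ===== CLAIM (what is proved, stated in full; the proofs are below) =====
def Claim_equal_generatePossibleSets : Prop := ∀ (nterms : Int) (terms : List String), Dom_generatePossibleSets nterms terms → Pre_generatePossibleSets nterms terms → Spec_generatePossibleSets nterms terms (generatePossibleSets nterms terms)
-- ===== LEMMAS AND PROOFS =====

lemma pvFlatten_map_singleton {α β : Type} (f : α → β) (l : List α) :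
    (l.map (fun x => [f x])).flatten = l.map f := by
  induction l with
  | nil => simp
  | cons a l ih => simp [ih]

-- one step of B's loop
def pvStep (terms : List String) (result : List (List String)) : List (List String) :=
  terms.flatMap (fun t => result.map (fun s => [t] ++ s))

lemma pvFoldl_range_step (terms : List String) (init : List (List String)) (n : Nat) (l : List Int)
    (hl : l.length = n) :
    l.foldl (fun result _ => pvStep terms result) init = (pvStep terms)^[n] init := by
  induction l generalizing init n with
  | nil => simp at hl; subst hl; simp
  | cons x xs ih =>
    cases n with
    | zero => simp at hl
    | succ m =>
      simp only [List.foldl_cons]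
      rw [ih _ _ (by simpa using hl), Function.iterate_succ_apply]

lemma pvA_eq_iter (n : Nat) (terms : List String) :
    generatePossibleSets ((n : Int) + 1) terms = (pvStep terms)^[n] (terms.map (fun t => [t])) := by
  induction n with
  | zero =>
    rw [generatePossibleSets]
    simp
    exact pvFlatten_map_singleton (fun t => [t]) terms
  | succ m ih =>
    rw [generatePossibleSets]
    have hc : ((m + 1 : Nat) : Int) = (m : Int) + 1 := by push_cast; ring
    rw [hc]
    have h0 : ¬ ((m : Int) + 1 + 1 ≤ 0) := by omega
    have h1 : ¬ ((m : Int) + 1 + 1 = 1) := by omega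
    rw [if_neg h0, if_neg h1]
    have harg : (m : Int) + 1 + 1 - 1 = (m : Int) + 1 := by ring
    rw [harg, ih]
    set subset := (pvStep terms)^[m] (terms.map (fun t => [t])) with hsub
    have hinner : ∀ (t : String) (s : List (List String)),
        (PySem.List.pyRange 0 (subset.length : Int) 1).foldl
          (fun s i => s ++ [[t] ++ PySem.List.pyGetD subset i []]) s
        = s ++ subset.map (fun x => [t] ++ x) := by
      intro t s
      rw [show ((subset.length : Nat) : Int) = PySem.List.len subset from rfl]
      rw [PySem.List.foldl_pyRange_pyGetD (f := fun s x => s ++ [[t] ++ x]) (a := 0)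
        (xs := subset) (d := []) (init := s) (by norm_num)]
      simp
      exact pvFlatten_map_singleton (fun x => t :: x) subset
    calc terms.foldl (fun s t =>
          (PySem.List.pyRange 0 (subset.length : Int) 1).foldl
            (fun s i => s ++ [[t] ++ PySem.List.pyGetD subset i []]) s) []
        = terms.foldl (fun s t => s ++ subset.map (fun x => [t] ++ x)) [] := by
          apply PySem.List.foldl_congr_mem
          intro s t _
          exact hinner t s
      _ = terms.flatMap (fun t => subset.map (fun x => [t] ++ x)) := by
          simpa using PySem.List.foldl_append_eq_flatMap
            (g := fun t => subset.map (fun x => [t] ++ x)) (l := terms) (acc := [])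
      _ = (pvStep terms)^[m + 1] (terms.map (fun t => [t])) := by
          rw [Function.iterate_succ_apply', ← hsub]; rfl

-- ===== VERDICT (by name: the statement is the Claim_ definition above) =====
theorem generatePossibleSets_spec : Claim_equal_generatePossibleSets := by
  intro nterms terms _ hpre
  unfold Spec_generatePossibleSets generatePossibleSets_alt
  obtain ⟨n, hn⟩ : ∃ n : Nat, nterms = (n : Int) + 1 :=
    ⟨(nterms - 1).toNat, by unfold Pre_generatePossibleSets at hpre; omega⟩
  subst hn
  rw [pvA_eq_iter]
  exact (pvFoldl_range_step terms (terms.map fun t => [t]) n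
    (PySem.List.pyRange 0 ((n : Int) + 1 - 1) 1)
    (by simp [PySem.List.length_pyRange_one])).symm
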